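-- pv_equiv track=rewrite | github.com/chancehl/advent-of-code-2025 | aoc/solutions/day10/solution.py | calculate_required_presses
-- ===== SOURCE A (Python) =====
-- from itertools import combinations
--
-- def calculate_required_presses(buttons: list[list[int]], joltages: list[int]) -> int:
--     if all(i == 0 for i in joltages):
--         return 0
--
--     answer = 1_000_000  # arbitrarily high, doesn't matter. we won't take 1 million button presses
--     number_of_variables = len(joltages)
--     pattern_costs = patterns_from_buttons(buttons, number_of_variables)
--
--     def recurse(goal: tuple[int, ...]) -> int:
--         if all(i == 0 for i in goal):
--             return 0
--
--         local_answer = answer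
--         for pattern, pattern_cost in pattern_costs.items():
--             # pattern must be <= goal elementwise and parity must match
--             if all(p <= g and (p % 2) == (g % 2) for p, g in zip(pattern, goal)):
--                 new_goal = tuple((g - p) // 2 for p, g in zip(pattern, goal))
--                 candidate = pattern_cost + 2 * recurse(new_goal)
--                 if candidate < local_answer:
--                     local_answer = candidate
--
--         return local_answer
--
--     return recurse(tuple(joltages))
--
-- def patterns_from_buttons(
--     buttons: list[list[int]], num_vars: int
-- ) -> dict[tuple[int, ...], int]:
--     out: dict[tuple[int, ...], int] = {}
--     num_buttons = len(buttons)
--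
--     # convert button definitions to coeff tuples (0/1 per variable)
--     coeffs = [tuple(int(i in b) for i in range(num_vars)) for b in buttons]
--
--     for pattern_len in range(num_buttons + 1):
--         for btn_indices in combinations(range(num_buttons), pattern_len):
--             # sum selected coeff tuples elementwise
--             pattern = tuple(
--                 map(sum, zip((0,) * num_vars, *(coeffs[i] for i in btn_indices)))
--             )
--             if pattern not in out:
--                 out[pattern] = pattern_len
--     return out
-- ===== SOURCE B (Python) =====
-- def calculate_required_presses(buttons: list[list[int]], joltages: list[int]) -> int:
--     if all(j == 0 for j in joltages):
--         return 0
--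
--     n = len(joltages)
--     # enumerate every subset of buttons directly (doubling list), instead of A's
--     # deduplicated pattern dict built from itertools.combinations
--     subsets: list[tuple[list[int], int]] = [([0] * n, 0)]
--     for b in buttons:
--         coeff = [1 if i in b else 0 for i in range(n)]
--         subsets += [([x + y for x, y in zip(p, coeff)], k + 1) for p, k in subsets]
--
--     memo: dict[tuple[int, ...], int] = {}
--
--     def solve(goal: tuple[int, ...]) -> int:
--         if goal in memo:
--             return memo[goal]
--         if all(g == 0 for g in goal):
--             memo[goal] = 0
--             return 0
--         best = 1_000_000
--         for p, k in subsets: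
--             if all(x <= g and x % 2 == g % 2 for x, g in zip(p, goal)):
--                 cand = k + 2 * solve(tuple((g - x) // 2 for x, g in zip(p, goal)))
--                 if cand < best:
--                     best = cand
--         memo[goal] = best
--         return best
--
--     return solve(tuple(joltages))
-- ===== Notes on version B (the rewrite author's own statement) =====
-- stated objective: alternative
-- what changed: A precomputes a deduplicated first-wins pattern-cost dict from itertools.combinations grouped by subset size and then recurses naively, revisiting goal states; B enumerates all button subsets directly with a doubling list (no combinations, no dict of patterns) and solves goals with a memoized recursion keyed by the goal tuple, so each reachable goal state is solved once.
import Mathlib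
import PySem

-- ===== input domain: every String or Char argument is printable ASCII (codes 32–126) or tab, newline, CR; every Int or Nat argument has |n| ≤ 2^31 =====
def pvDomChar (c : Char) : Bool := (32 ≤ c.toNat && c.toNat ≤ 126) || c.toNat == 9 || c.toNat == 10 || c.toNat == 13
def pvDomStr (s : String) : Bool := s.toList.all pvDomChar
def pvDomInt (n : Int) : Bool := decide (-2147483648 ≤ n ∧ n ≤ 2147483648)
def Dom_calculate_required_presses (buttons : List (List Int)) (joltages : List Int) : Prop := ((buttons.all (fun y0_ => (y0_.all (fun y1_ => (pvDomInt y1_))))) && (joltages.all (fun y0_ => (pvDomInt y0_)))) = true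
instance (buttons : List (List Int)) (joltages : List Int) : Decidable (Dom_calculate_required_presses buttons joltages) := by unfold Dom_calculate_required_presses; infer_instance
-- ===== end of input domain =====

-- B replaces A's deduplicated pattern dictionary (itertools.combinations grouped by length,
-- first-wins dict) by a direct doubling enumeration of all button subsets, and replaces A's
-- naive recursion by a memoized solver: same result, genuinely different algorithm/data layout.


-- ===== PORT A =====
-- `all(i == 0 for i in goal)` (same line occurs in Source A and Source B)
def pvAllZero (g : List Int) : Bool := g.all (fun i => i == 0)

-- `all(p <= g and (p % 2) == (g % 2) for p, g in zip(pattern, goal))` (both sources)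
def pvCondOK (p g : List Int) : Bool :=
  (p.zip g).all (fun x => decide (x.1 ≤ x.2) && (PySem.Int.mod x.1 2 == PySem.Int.mod x.2 2))

-- `tuple((g - p) // 2 for p, g in zip(pattern, goal))` (both sources)
def pvNewGoal (p g : List Int) : List Int :=
  (p.zip g).map (fun x => PySem.Int.floordiv (x.2 - x.1) 2)

-- `tuple(int(i in b) for i in range(num_vars))` (both sources)
def pvCoeff (n : Nat) (b : List Int) : List Int :=
  (List.range n).map (fun i => if (i : Int) ∈ b then (1 : Int) else 0)

-- itertools.combinations(xs, k) in Python's (lexicographic) order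
def pvCombos : Nat → List Nat → List (List Nat)
  | 0, _ => [[]]
  | _ + 1, [] => []
  | k + 1, x :: xs => ((pvCombos k xs).map (fun l => x :: l)) ++ pvCombos (k + 1) xs

-- `tuple(map(sum, zip((0,)*num_vars, *(coeffs[i] for i in btn_indices))))`
def pvSumPattern (coeffs : List (List Int)) (n : Nat) (idxs : List Nat) : List Int :=
  idxs.foldl (fun acc i => (acc.zip (coeffs.getD i [])).map (fun x => x.1 + x.2))
    (List.replicate n (0 : Int))

-- patterns_from_buttons (A only)
def patterns_from_buttons (buttons : List (List Int)) (num_vars : Nat) :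
    PySem.Dict (List Int) Int :=
  let coeffs := buttons.map (pvCoeff num_vars)
  (List.range (buttons.length + 1)).foldl (fun out pattern_len =>
      (pvCombos pattern_len (List.range buttons.length)).foldl (fun out idxs =>
          let pattern := pvSumPattern coeffs num_vars idxs
          if (out.get? pattern).isSome then out else out.insert pattern (pattern_len : Int))
        out)
    PySem.Dict.empty

-- A's inner `recurse`; Python's unbounded recursion terminates because each recursive call
-- strictly shrinks the goal, so a fuel of (sum of |joltages|) + 1 never runs out (proved below).
def pvRecurseA (pats : List (List Int × Int)) : Nat → List Int → Int
  | 0, _ => 1000000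
  | fuel + 1, goal =>
    if pvAllZero goal then 0
    else
      pats.foldl (fun local_answer pc =>
          if pvCondOK pc.1 goal then
            let candidate := pc.2 + 2 * pvRecurseA pats fuel (pvNewGoal pc.1 goal)
            if candidate < local_answer then candidate else local_answer
          else local_answer)
        1000000

def calculate_required_presses (buttons : List (List Int)) (joltages : List Int) : Int :=
  if pvAllZero joltages then 0
  else
    let pattern_costs := patterns_from_buttons buttons joltages.length
    pvRecurseA pattern_costs.items ((joltages.map Int.natAbs).sum + 1) joltages

-- ===== PORT B =====
-- `[x + y for x, y in zip(p, coeff)]`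
def pvZipAdd (p c : List Int) : List Int := (p.zip c).map (fun x => x.1 + x.2)

-- B's doubling subset enumeration:
-- subsets = [([0]*n, 0)]; for b in buttons: subsets += [(p+coeff, k+1) for p, k in subsets]
def pvSubsets (n : Nat) (buttons : List (List Int)) : List (List Int × Int) :=
  buttons.foldl (fun subs b =>
      subs ++ subs.map (fun pk => (pvZipAdd pk.1 (pvCoeff n b), pk.2 + 1)))
    [(List.replicate n (0 : Int), (0 : Int))]

-- B's memoized `solve`: the memo dict is threaded through; same fuel bound as A's port.
def pvSolveB (subs : List (List Int × Int)) :
    Nat → List Int → PySem.Dict (List Int) Int → Int × PySem.Dict (List Int) Int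
  | 0, _, memo => (1000000, memo)
  | fuel + 1, goal, memo =>
    match memo.get? goal with
    | some v => (v, memo)
    | none =>
      if pvAllZero goal then (0, memo.insert goal 0)
      else
        let r := subs.foldl
          (fun (acc : Int × PySem.Dict (List Int) Int) pc =>
            if pvCondOK pc.1 goal then
              let rm := pvSolveB subs fuel (pvNewGoal pc.1 goal) acc.2
              let candidate := pc.2 + 2 * rm.1
              (if candidate < acc.1 then candidate else acc.1, rm.2)
            else acc)
          (1000000, memo)
        (r.1, r.2.insert goal r.1)

def calculate_required_presses_alt (buttons : List (List Int)) (joltages : List Int) : Int :=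
  if pvAllZero joltages then 0
  else
    let subsets := pvSubsets joltages.length buttons
    (pvSolveB subsets ((joltages.map Int.natAbs).sum + 1) joltages PySem.Dict.empty).1

-- ===== PRECONDITION & SPEC =====
def Spec_calculate_required_presses (buttons : List (List Int)) (joltages : List Int) (out : Int) : Prop := out = calculate_required_presses_alt buttons joltages
instance (buttons : List (List Int)) (joltages : List Int) (out : Int) : Decidable (Spec_calculate_required_presses buttons joltages out) := by unfold Spec_calculate_required_presses; infer_instance

-- ===== CLAIM (what is proved, stated in full; the proofs are below) =====
def Claim_equal_calculate_required_presses : Prop := ∀ (buttons : List (List Int)) (joltages : List Int), Dom_calculate_required_presses buttons joltages → Spec_calculate_required_presses buttons joltages (calculate_required_presses buttons joltages)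

-- ===== LEMMAS AND PROOFS =====

-- size measure of a goal: only positive coordinates count
def pvMeasure (g : List Int) : Nat := (g.map Int.toNat).sum

-- "good" pattern list: every key has length n and nonnegative entries
def pvGoodPats (pats : List (List Int × Int)) (n : Nat) : Prop :=
  ∀ pc ∈ pats, pc.1.length = n ∧ ∀ x ∈ pc.1, 0 ≤ x

-- the fuel-independent value of A's recursion shape over a pattern list
def pvLimit (pats : List (List Int × Int)) (g : List Int) : Int :=
  pvRecurseA pats (pvMeasure g + 1) g

-- the shared fold step with the recursive call abstracted into V
def pvStep (V : List Int → Int) (g : List Int) (la : Int) (pc : List Int × Int) : Int :=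
  if pvCondOK pc.1 g then
    if pc.2 + 2 * V (pvNewGoal pc.1 g) < la then pc.2 + 2 * V (pvNewGoal pc.1 g) else la
  else la

-- the canonical meaning of a subset of buttons: its summed 0/1 pattern
def pvSumOf (n : Nat) (bs : List (List Int)) : List Int :=
  (bs.map (pvCoeff n)).foldl pvZipAdd (List.replicate n (0 : Int))

-- memo invariant: every cached value is the true value
def pvInv (pats : List (List Int × Int)) (memo : PySem.Dict (List Int) Int) : Prop :=
  ∀ kv ∈ memo.items, kv.2 = pvLimit pats kv.1

theorem pvCombos_iff {xs : List Nat} : ∀ {k l}, l ∈ pvCombos k xs ↔ (List.Sublist l xs ∧ l.length = k) := by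
  induction xs with
  | nil =>
    intro k l
    cases k with
    | zero =>
      simp only [pvCombos, List.mem_singleton]
      constructor
      · rintro rfl; exact ⟨List.Sublist.refl _, rfl⟩
      · rintro ⟨hs, hl⟩; exact List.length_eq_zero_iff.mp hl
    | succ k =>
      simp only [pvCombos, List.not_mem_nil, false_iff, not_and]
      intro hs
      rw [List.sublist_nil.mp hs]
      simp
  | cons x xs ih =>
    intro k l
    cases k with
    | zero =>
      simp only [pvCombos, List.mem_singleton]
      constructor
      · rintro rfl; exact ⟨List.nil_sublist _, rfl⟩
      · rintro ⟨hs, hl⟩; exact List.length_eq_zero_iff.mp hl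
    | succ k =>
      rw [pvCombos, List.mem_append]
      constructor
      · rintro (hm | hm)
        · rcases List.mem_map.mp hm with ⟨l', hl', rfl⟩
          obtain ⟨hs, hlen⟩ := ih.mp hl'
          exact ⟨List.Sublist.cons₂ x hs, by simp [hlen]⟩
        · obtain ⟨hs, hlen⟩ := ih.mp hm
          exact ⟨List.Sublist.cons x hs, hlen⟩
      · rintro ⟨hs, hlen⟩
        rcases List.sublist_cons_iff.mp hs with hs' | ⟨r, rfl, hr⟩
        · exact Or.inr (ih.mpr ⟨hs', hlen⟩)
        · refine Or.inl (List.mem_map.mpr ⟨r, ih.mpr ⟨hr, ?_⟩, rfl⟩)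
          simpa using hlen

theorem pvRangeMapGetD (l : List (List Int)) :
    (List.range l.length).map (fun i => l.getD i []) = l := by
  apply List.ext_getElem
  · simp
  · intro i h1 h2; rw [List.getElem_map, List.getElem_range, List.getD_eq_getElem l [] h2]

theorem pvSumPattern_eq (buttons : List (List Int)) (n : Nat) (idxs : List Nat)
    (h : ∀ i ∈ idxs, i < buttons.length) :
    pvSumPattern (buttons.map (pvCoeff n)) n idxs
      = pvSumOf n (idxs.map (fun i => buttons.getD i [])) := by
  rw [pvSumOf, List.map_map, List.foldl_map]
  rw [pvSumPattern]
  apply PySem.List.foldl_congr_mem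
  intro acc i hi
  have hlt : i < buttons.length := h i hi
  have : (buttons.map (pvCoeff n)).getD i [] = pvCoeff n (buttons.getD i []) := by
    rw [List.getD_eq_getElem _ [] (by simpa using hlt), List.getElem_map,
        List.getD_eq_getElem _ [] hlt]
  rw [this]
  rfl

theorem pvZipAdd_good {n : Nat} {p c : List Int} (hp : p.length = n) (hc : c.length = n)
    (hpn : ∀ x ∈ p, 0 ≤ x) (hcn : ∀ x ∈ c, 0 ≤ x) :
    (pvZipAdd p c).length = n ∧ ∀ x ∈ pvZipAdd p c, 0 ≤ x := by
  constructor
  · simp [pvZipAdd, hp, hc]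
  · intro x hx
    rcases List.mem_map.mp hx with ⟨⟨u, v⟩, huv, rfl⟩
    obtain ⟨hu, hv⟩ := List.of_mem_zip huv
    have := hpn _ hu; have := hcn _ hv
    simp only; omega

theorem pvCoeff_good (n : Nat) (b : List Int) :
    (pvCoeff n b).length = n ∧ ∀ x ∈ pvCoeff n b, 0 ≤ x := by
  constructor
  · simp [pvCoeff]
  · intro x hx
    rcases List.mem_map.mp hx with ⟨i, _, rfl⟩
    split <;> omega

theorem pvSumOf_good (n : Nat) (bs : List (List Int)) :
    (pvSumOf n bs).length = n ∧ ∀ x ∈ pvSumOf n bs, 0 ≤ x := by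
  suffices H : ∀ (cs : List (List Int)) (acc : List Int), acc.length = n →
      (∀ x ∈ acc, 0 ≤ x) → (∀ c ∈ cs, c.length = n ∧ ∀ x ∈ c, 0 ≤ x) →
      (cs.foldl pvZipAdd acc).length = n ∧ ∀ x ∈ cs.foldl pvZipAdd acc, 0 ≤ x by
    refine H _ _ (by simp) ?_ ?_
    · intro x hx; rcases List.eq_of_mem_replicate hx with rfl; omega
    · intro c hc
      rcases List.mem_map.mp hc with ⟨b, _, rfl⟩
      exact pvCoeff_good n b
  intro cs
  induction cs with
  | nil => intro acc h1 h2 _; exact ⟨h1, h2⟩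
  | cons c cs ihc =>
    intro acc h1 h2 h3
    obtain ⟨hcl, hcn⟩ := h3 c (List.mem_cons_self ..)
    obtain ⟨hl, hn⟩ := pvZipAdd_good h1 hcl h2 hcn
    exact ihc _ hl hn (fun c' hc' => h3 c' (List.mem_cons_of_mem _ hc'))

-- conditional-insert fold preserves a property of all items
theorem pvFoldInsert_P {β : Type} (P : List Int × Int → Prop) (key : β → List Int) (v : β → Int) :
    ∀ (l : List β) (d : PySem.Dict (List Int) Int),
      (∀ kv ∈ d.items, P kv) → (∀ b ∈ l, P (key b, v b)) →
      ∀ kv ∈ (l.foldl (fun out b =>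
          if ((out.get? (key b)).isSome) then out else out.insert (key b) (v b)) d).items, P kv := by
  intro l
  induction l with
  | nil => intro d hd _ kv hkv; exact hd kv hkv
  | cons b l ih =>
    intro d hd hl kv hkv
    refine ih _ ?_ (fun b' hb' => hl b' (List.mem_cons_of_mem _ hb')) kv hkv
    intro kv' hkv'
    by_cases hs : (d.get? (key b)).isSome
    · simp only [hs, if_true] at hkv'; exact hd kv' hkv'
    · simp only [hs, if_false, Bool.false_eq_true] at hkv'
      rcases (PySem.Dict.mem_items_insert _ _ _ _).mp hkv' with rfl | ⟨h, _⟩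
      · exact hl b (List.mem_cons_self ..)
      · exact hd kv' h

-- conditional-insert fold preserves every existing binding
theorem pvFoldInsert_some {β : Type} (key : β → List Int) (v : β → Int) :
    ∀ (l : List β) (d : PySem.Dict (List Int) Int) (p : List Int) (c : Int),
      d.get? p = some c →
      (l.foldl (fun out b =>
          if ((out.get? (key b)).isSome) then out else out.insert (key b) (v b)) d).get? p = some c := by
  intro l
  induction l with
  | nil => intro d p c h; exact h
  | cons b l ih =>
    intro d p c h
    refine ih _ p c ?_
    by_cases hs : (d.get? (key b)).isSome
    · simp only [hs, if_true]; exact h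
    · simp only [hs, if_false, Bool.false_eq_true]
      by_cases he : p = key b
      · subst he; rw [h] at hs; simp at hs
      · rw [PySem.Dict.get?_insert]; simp only [if_neg he]; exact h

-- A-side soundness: every dict item is the pattern/size of some sub-multiset of buttons
theorem pvA_sound (buttons : List (List Int)) (n : Nat) :
    ∀ pc ∈ (patterns_from_buttons buttons n).items,
      ∃ bs, List.Sublist bs buttons ∧ pc.1 = pvSumOf n bs ∧ pc.2 = (bs.length : Int) := by
  simp only [patterns_from_buttons]
  set coeffs := buttons.map (pvCoeff n) 
  have aux : ∀ (ks : List Nat) (d : PySem.Dict (List Int) Int),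
      (∀ kv ∈ d.items, ∃ bs, List.Sublist bs buttons ∧ kv.1 = pvSumOf n bs ∧ kv.2 = (bs.length : Int)) →
      ∀ kv ∈ (ks.foldl (fun out pattern_len =>
          (pvCombos pattern_len (List.range buttons.length)).foldl (fun out idxs =>
              let pattern := pvSumPattern coeffs n idxs
              if (out.get? pattern).isSome then out else out.insert pattern (pattern_len : Int))
            out) d).items,
        ∃ bs, List.Sublist bs buttons ∧ kv.1 = pvSumOf n bs ∧ kv.2 = (bs.length : Int) := by
    intro ks
    induction ks with
    | nil => intro d hd kv hkv; exact hd kv hkv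
    | cons k ks ih =>
      intro d hd kv hkv
      refine ih _ ?_ kv hkv
      refine pvFoldInsert_P
        (fun kv => ∃ bs, List.Sublist bs buttons ∧ kv.1 = pvSumOf n bs ∧ kv.2 = (bs.length : Int))
        (fun idxs => pvSumPattern coeffs n idxs) (fun _ => (k : Int)) _ d hd ?_
      intro idxs hidxs
      obtain ⟨hsl, hlenk⟩ := pvCombos_iff.mp hidxs
      have helems : ∀ i ∈ idxs, i < buttons.length := fun i hi =>
        List.mem_range.mp (hsl.subset hi)
      refine ⟨idxs.map (fun i => buttons.getD i []), ?_, ?_, ?_⟩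
      · have := List.Sublist.map (fun i => buttons.getD i []) hsl
        rwa [pvRangeMapGetD buttons] at this
      · exact pvSumPattern_eq buttons n idxs helems
      · simp [hlenk]
  intro pc hpc
  refine aux _ PySem.Dict.empty ?_ pc hpc
  intro kv' hkv'
  have he : (PySem.Dict.empty : PySem.Dict (List Int) Int).items = [] := rfl
  rw [he] at hkv'; simp at hkv'

-- A-side completeness: every subset's pattern is in the dict with a cost ≤ its size
theorem pvInner_cover (coeffs : List (List Int)) (n : Nat) (k : Nat) :
    ∀ (l : List (List Nat)) (d : PySem.Dict (List Int) Int),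
      (∀ kv ∈ d.items, kv.2 ≤ (k : Int)) →
      ∀ idxs ∈ l, ∃ c, ((l.foldl (fun out idxs =>
          let pattern := pvSumPattern coeffs n idxs
          if (out.get? pattern).isSome then out else out.insert pattern (k : Int)) d).get?
            (pvSumPattern coeffs n idxs)) = some c ∧ c ≤ (k : Int) := by
  intro l
  induction l with
  | nil => intro d _ idxs h; simp at h
  | cons j l ih =>
    intro d hb idxs hmem
    have hstepb : ∀ kv ∈ ((if ((d.get? (pvSumPattern coeffs n j)).isSome) then d
        else d.insert (pvSumPattern coeffs n j) (k : Int)).items), kv.2 ≤ (k : Int) := by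
      intro kv hkv
      by_cases hs : (d.get? (pvSumPattern coeffs n j)).isSome
      · simp only [hs, if_true] at hkv; exact hb kv hkv
      · simp only [hs, if_false, Bool.false_eq_true] at hkv
        rcases (PySem.Dict.mem_items_insert _ _ _ _).mp hkv with rfl | ⟨h, _⟩
        · exact le_refl _
        · exact hb kv h
    rcases List.mem_cons.mp hmem with rfl | hmem'
    · by_cases hs : (d.get? (pvSumPattern coeffs n idxs)).isSome
      · obtain ⟨c, hc⟩ := Option.isSome_iff_exists.mp hs
        have hcle : c ≤ (k : Int) :=
          hb (pvSumPattern coeffs n idxs, c) (PySem.Dict.mem_items_of_get?_eq_some _ hc)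
        refine ⟨c, ?_, hcle⟩
        show (l.foldl _ (if ((d.get? (pvSumPattern coeffs n idxs)).isSome) then d
            else d.insert (pvSumPattern coeffs n idxs) (k : Int))).get? _ = some c
        rw [if_pos hs]
        exact pvFoldInsert_some (fun idxs => pvSumPattern coeffs n idxs) (fun _ => (k : Int)) l d _ c hc
      · refine ⟨(k : Int), ?_, le_refl _⟩
        show (l.foldl _ (if ((d.get? (pvSumPattern coeffs n idxs)).isSome) then d
            else d.insert (pvSumPattern coeffs n idxs) (k : Int))).get? _ = some (k : Int)
        rw [if_neg hs]
        exact pvFoldInsert_some (fun idxs => pvSumPattern coeffs n idxs) (fun _ => (k : Int)) l _ _ _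
          (PySem.Dict.get?_insert_self _ _ _)
    · exact ih _ hstepb idxs hmem'

theorem pvA_complete_aux (buttons : List (List Int)) (n : Nat) :
    ∀ K : Nat,
      (∀ kv ∈ ((List.range K).foldl (fun out pattern_len =>
          (pvCombos pattern_len (List.range buttons.length)).foldl (fun out idxs =>
              let pattern := pvSumPattern (buttons.map (pvCoeff n)) n idxs
              if (out.get? pattern).isSome then out else out.insert pattern (pattern_len : Int))
            out) PySem.Dict.empty).items, kv.2 + 1 ≤ (K : Int)) ∧
      (∀ idxs, List.Sublist idxs (List.range buttons.length) → idxs.length < K →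
        ∃ c, ((List.range K).foldl (fun out pattern_len =>
          (pvCombos pattern_len (List.range buttons.length)).foldl (fun out idxs =>
              let pattern := pvSumPattern (buttons.map (pvCoeff n)) n idxs
              if (out.get? pattern).isSome then out else out.insert pattern (pattern_len : Int))
            out) PySem.Dict.empty).get? (pvSumPattern (buttons.map (pvCoeff n)) n idxs)
            = some c ∧ c ≤ (idxs.length : Int)) := by
  intro K
  induction K with
  | zero =>
    constructor
    · intro kv hkv
      have he : (PySem.Dict.empty : PySem.Dict (List Int) Int).items = [] := rfl
      simp only [List.range_zero, List.foldl_nil] at hkv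
      rw [he] at hkv; simp at hkv
    · intro idxs _ h; omega
  | succ K ih =>
    obtain ⟨ihb, ihc⟩ := ih
    rw [List.range_succ]
    simp only [List.foldl_append, List.foldl_cons, List.foldl_nil]
    constructor
    · refine pvFoldInsert_P (fun kv => kv.2 + 1 ≤ ((K + 1 : Nat) : Int))
        (fun idxs => pvSumPattern (buttons.map (pvCoeff n)) n idxs) (fun _ => (K : Int)) _ _ ?_ ?_
      · intro kv hkv
        have := ihb kv hkv
        push_cast
        push_cast at this
        omega
      · intro idxs _
        push_cast
        omega
    · intro idxs hsl hlen
      by_cases hcase : idxs.length < K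
      · obtain ⟨c, hc, hcle⟩ := ihc idxs hsl hcase
        exact ⟨c, pvFoldInsert_some (fun idxs => pvSumPattern (buttons.map (pvCoeff n)) n idxs)
          (fun _ => (K : Int)) _ _ _ c hc, hcle⟩
      · have hlenK : idxs.length = K := by omega
        have hmem : idxs ∈ pvCombos K (List.range buttons.length) :=
          pvCombos_iff.mpr ⟨hsl, hlenK⟩
        have hbound : ∀ kv ∈ ((List.range K).foldl (fun out pattern_len =>
            (pvCombos pattern_len (List.range buttons.length)).foldl (fun out idxs =>
                let pattern := pvSumPattern (buttons.map (pvCoeff n)) n idxs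
                if (out.get? pattern).isSome then out else out.insert pattern (pattern_len : Int))
              out) PySem.Dict.empty).items, kv.2 ≤ (K : Int) := by
          intro kv hkv
          have := ihb kv hkv
          omega
        obtain ⟨c, hc, hcle⟩ := pvInner_cover (buttons.map (pvCoeff n)) n K _ _ hbound idxs hmem
        exact ⟨c, hc, by rw [hlenK]; exact hcle⟩

theorem pvA_complete (buttons : List (List Int)) (n : Nat) :
    ∀ bs, List.Sublist bs buttons →
      ∃ c, (patterns_from_buttons buttons n).get? (pvSumOf n bs) = some c ∧ c ≤ (bs.length : Int) := by
  intro bs hsl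
  have hbt : List.Sublist bs ((List.range buttons.length).map (fun i => buttons.getD i [])) := by
    rwa [pvRangeMapGetD buttons]
  obtain ⟨idxs, hisl, rfl⟩ := List.sublist_map_iff.mp hbt
  have helems : ∀ i ∈ idxs, i < buttons.length := fun i hi =>
    List.mem_range.mp (hisl.subset hi)
  have hlen : idxs.length < buttons.length + 1 := by
    have := hisl.length_le
    simp only [List.length_range] at this
    omega
  obtain ⟨c, hc, hcle⟩ := (pvA_complete_aux buttons n (buttons.length + 1)).2 idxs hisl hlen
  refine ⟨c, ?_, by simpa using hcle⟩
  rw [← pvSumPattern_eq buttons n idxs helems]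
  exact hc

-- B-side characterisation of the doubling enumeration
theorem pvSubsets_fold_mem (n : Nat) :
    ∀ (bts : List (List Int)) (s0 : List (List Int × Int)) (pc : List Int × Int),
      pc ∈ bts.foldl (fun subs b =>
          subs ++ subs.map (fun pk => (pvZipAdd pk.1 (pvCoeff n b), pk.2 + 1))) s0 ↔
      ∃ s ∈ s0, ∃ bs, List.Sublist bs bts ∧
        pc.1 = (bs.map (pvCoeff n)).foldl pvZipAdd s.1 ∧ pc.2 = s.2 + (bs.length : Int) := by
  intro bts
  induction bts with
  | nil =>
    intro s0 pc
    simp only [List.foldl_nil]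
    constructor
    · intro h
      exact ⟨pc, h, [], List.nil_sublist _, rfl, by simp⟩
    · rintro ⟨s, hs, bs, hsl, h1, h2⟩
      rw [List.sublist_nil.mp hsl] at h1 h2
      simp only [List.map_nil, List.foldl_nil, List.length_nil, Nat.cast_zero, add_zero] at h1 h2
      have : pc = s := Prod.ext h1 h2
      rw [this]; exact hs
  | cons b bts ih =>
    intro s0 pc
    rw [List.foldl_cons, ih]
    constructor
    · rintro ⟨s, hs, bs, hsl, h1, h2⟩
      rcases List.mem_append.mp hs with hs' | hs'
      · exact ⟨s, hs', bs, List.Sublist.cons b hsl, h1, h2⟩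
      · rcases List.mem_map.mp hs' with ⟨s', hs'', rfl⟩
        refine ⟨s', hs'', b :: bs, List.Sublist.cons₂ b hsl, ?_, ?_⟩
        · rw [List.map_cons, List.foldl_cons]; exact h1
        · rw [h2]; simp only [List.length_cons]; push_cast; ring
    · rintro ⟨s, hs, bs, hsl, h1, h2⟩
      rcases List.sublist_cons_iff.mp hsl with hs' | ⟨r, rfl, hr⟩
      · exact ⟨s, List.mem_append_left _ hs, bs, hs', h1, h2⟩
      · refine ⟨(pvZipAdd s.1 (pvCoeff n b), s.2 + 1),
          List.mem_append_right _ (List.mem_map.mpr ⟨s, hs, rfl⟩), r, hr, ?_, ?_⟩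
        · rw [List.map_cons, List.foldl_cons] at h1; exact h1
        · rw [h2]; simp only [List.length_cons]; push_cast; ring

theorem pvB_mem (buttons : List (List Int)) (n : Nat) :
    ∀ pc, pc ∈ pvSubsets n buttons ↔
      ∃ bs, List.Sublist bs buttons ∧ pc.1 = pvSumOf n bs ∧ pc.2 = (bs.length : Int) := by
  intro pc
  rw [pvSubsets, pvSubsets_fold_mem n buttons]
  constructor
  · rintro ⟨s, hs, bs, hsl, h1, h2⟩
    rcases List.mem_singleton.mp hs with rfl
    exact ⟨bs, hsl, h1, by rw [h2]; ring⟩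
  · rintro ⟨bs, hsl, h1, h2⟩
    exact ⟨(List.replicate n (0 : Int), (0 : Int)), List.mem_singleton.mpr rfl, bs, hsl, h1,
      by rw [h2]; ring⟩

theorem pvStep_len {p g : List Int} (hl : p.length = g.length) :
    (pvNewGoal p g).length = g.length := by
  simp [pvNewGoal, hl]

theorem pvMeasure_cons (a : Int) (l : List Int) : pvMeasure (a :: l) = a.toNat + pvMeasure l := by
  simp [pvMeasure]

theorem pvCondOK_cons {x y : Int} {p g : List Int} (h : pvCondOK (x :: p) (y :: g) = true) :
    x ≤ y ∧ pvCondOK p g = true := by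
  rw [pvCondOK, List.zip_cons_cons, List.all_cons, Bool.and_eq_true] at h
  obtain ⟨h1, h2⟩ := h
  rw [Bool.and_eq_true, decide_eq_true_eq] at h1
  exact ⟨h1.1, h2⟩

theorem pvMeasure_le {p g : List Int} (hc : pvCondOK p g = true) (hp : ∀ x ∈ p, 0 ≤ x) :
    pvMeasure (pvNewGoal p g) ≤ pvMeasure g := by
  induction p generalizing g with
  | nil => simp [pvNewGoal, pvMeasure]
  | cons x p ih =>
    cases g with
    | nil => simp [pvNewGoal, pvMeasure]
    | cons y g =>
      obtain ⟨hxy, hctail⟩ := pvCondOK_cons hc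
      have hx : 0 ≤ x := hp x (List.mem_cons_self ..)
      have htail := ih hctail (fun z hz => hp z (List.mem_cons_of_mem _ hz))
      rw [pvNewGoal, List.zip_cons_cons, List.map_cons, pvMeasure_cons, pvMeasure_cons]
      rw [pvNewGoal] at htail
      have hproj : ((x, y).2 : Int) - (x, y).1 = y - x := rfl
      rw [hproj]
      have hhead : (PySem.Int.floordiv (y - x) 2).toNat ≤ y.toNat := by
        rw [PySem.Int.floordiv_eq_ediv_of_pos (by norm_num)]; omega
      omega

theorem pvMeasure_lt {p g : List Int} (hl : p.length = g.length) (hp : ∀ x ∈ p, 0 ≤ x)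
    (hc : pvCondOK p g = true) (hz : pvAllZero g = false) :
    pvMeasure (pvNewGoal p g) < pvMeasure g := by
  induction p generalizing g with
  | nil =>
    cases g with
    | nil => simp [pvAllZero] at hz
    | cons y g => simp at hl
  | cons x p ih =>
    cases g with
    | nil => simp at hl
    | cons y g =>
      obtain ⟨hxy, hctail⟩ := pvCondOK_cons hc
      have hx : 0 ≤ x := hp x (List.mem_cons_self ..)
      have hptail : ∀ z ∈ p, 0 ≤ z := fun z hz' => hp z (List.mem_cons_of_mem _ hz')
      rw [pvNewGoal, List.zip_cons_cons, List.map_cons, pvMeasure_cons, pvMeasure_cons]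
      by_cases hy : y = 0
      · subst hy
        have hx0 : x = 0 := le_antisymm hxy hx
        subst hx0
        have hztail : pvAllZero g = false := by simpa [pvAllZero] using hz
        have hl' : p.length = g.length := by simpa using hl
        have htail := ih hl' hptail hctail hztail
        rw [pvNewGoal] at htail
        have hproj : ((0, 0).2 : Int) - (0, 0).1 = 0 := rfl
        rw [hproj]
        have hhead : (PySem.Int.floordiv 0 2).toNat = 0 := by
          rw [PySem.Int.floordiv_eq_ediv_of_pos (by norm_num)]; norm_num
        omega
      · have htail := pvMeasure_le hctail hptail
        rw [pvNewGoal] at htail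
        have hproj : ((x, y).2 : Int) - (x, y).1 = y - x := rfl
        rw [hproj]
        have hhead : (PySem.Int.floordiv (y - x) 2).toNat < y.toNat := by
          rw [PySem.Int.floordiv_eq_ediv_of_pos (by norm_num)]; omega
        omega

theorem pvStable (pats : List (List Int × Int)) (n : Nat) (hg : pvGoodPats pats n) :
    ∀ (fuel : Nat) (g : List Int), g.length = n → pvMeasure g + 1 ≤ fuel →
      pvRecurseA pats fuel g = pvLimit pats g := by
  intro fuel
  induction fuel using Nat.strong_induction_on with
  | _ fuel ih =>
    intro g hlen hfuel
    cases fuel with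
    | zero => omega
    | succ f =>
      show pvRecurseA pats (f + 1) g = pvRecurseA pats (pvMeasure g + 1) g
      rw [pvRecurseA, pvRecurseA]
      by_cases hz : pvAllZero g = true
      · simp [hz]
      · rw [Bool.not_eq_true] at hz
        simp only [hz, Bool.false_eq_true, if_false]
        apply PySem.List.foldl_congr_mem
        intro acc pc hpc
        by_cases hcond : pvCondOK pc.1 g = true
        · simp only [hcond, if_true]
          obtain ⟨hplen, hpnn⟩ := hg pc hpc
          have hlt := pvMeasure_lt (by omega : pc.1.length = g.length) hpnn hcond hz
          have hlen' : (pvNewGoal pc.1 g).length = n := by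
            rw [pvStep_len (by omega : pc.1.length = g.length)]; exact hlen
          rw [ih f (by omega) _ hlen' (by omega),
              ih (pvMeasure g) (by omega) _ hlen' (by omega)]
        · simp [hcond]

theorem pvLimit_unfold (pats : List (List Int × Int)) (n : Nat) (hg : pvGoodPats pats n)
    (g : List Int) (hlen : g.length = n) (hz : pvAllZero g = false) :
    pvLimit pats g = pats.foldl (pvStep (pvLimit pats) g) 1000000 := by
  rw [pvLimit, pvRecurseA]
  simp only [hz, Bool.false_eq_true, if_false]
  apply PySem.List.foldl_congr_mem
  intro acc pc hpc
  by_cases hcond : pvCondOK pc.1 g = true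
  · simp only [pvStep, hcond, if_true]
    obtain ⟨hplen, hpnn⟩ := hg pc hpc
    have hlt := pvMeasure_lt (by omega : pc.1.length = g.length) hpnn hcond hz
    have hlen' : (pvNewGoal pc.1 g).length = n := by
      rw [pvStep_len (by omega : pc.1.length = g.length)]; exact hlen
    rw [pvStable pats n hg (pvMeasure g) _ hlen' (by omega)]
  · simp [pvStep, hcond]

-- min-fold machinery for pvStep
theorem pvFold_le_init (V : List Int → Int) (g : List Int) :
    ∀ (l : List (List Int × Int)) (a : Int), l.foldl (pvStep V g) a ≤ a := by
  intro l
  induction l with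
  | nil => intro a; exact le_refl a
  | cons pc l ih =>
    intro a
    calc (pc :: l).foldl (pvStep V g) a = l.foldl (pvStep V g) (pvStep V g a pc) := rfl
    _ ≤ pvStep V g a pc := ih _
    _ ≤ a := by
        unfold pvStep
        split_ifs with h1 h2
        · exact le_of_lt h2
        · exact le_refl a
        · exact le_refl a

theorem pvFold_le_cand (V : List Int → Int) (g : List Int) :
    ∀ (l : List (List Int × Int)) (a : Int) (pc : List Int × Int), pc ∈ l →
      pvCondOK pc.1 g = true →
      l.foldl (pvStep V g) a ≤ pc.2 + 2 * V (pvNewGoal pc.1 g) := by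
  intro l
  induction l with
  | nil => intro a pc h; simp at h
  | cons qc l ih =>
    intro a pc hmem hcond
    rcases List.mem_cons.mp hmem with rfl | hmem'
    · calc (pc :: l).foldl (pvStep V g) a = l.foldl (pvStep V g) (pvStep V g a pc) := rfl
      _ ≤ pvStep V g a pc := pvFold_le_init V g l _
      _ ≤ pc.2 + 2 * V (pvNewGoal pc.1 g) := by
          unfold pvStep
          simp only [hcond, if_true]
          split_ifs with h
          · exact le_refl _
          · exact Int.not_lt.mp h
    · exact ih _ pc hmem' hcond

theorem pvFold_cases (V : List Int → Int) (g : List Int) :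
    ∀ (l : List (List Int × Int)) (a : Int),
      l.foldl (pvStep V g) a = a ∨
      ∃ pc ∈ l, pvCondOK pc.1 g = true ∧
        l.foldl (pvStep V g) a = pc.2 + 2 * V (pvNewGoal pc.1 g) := by
  intro l
  induction l with
  | nil => intro a; exact Or.inl rfl
  | cons qc l ih =>
    intro a
    have hstep : (qc :: l).foldl (pvStep V g) a = l.foldl (pvStep V g) (pvStep V g a qc) := rfl
    rcases ih (pvStep V g a qc) with h | ⟨pc, hmem, hcond, heq⟩
    · by_cases hc : pvCondOK qc.1 g = true
      · by_cases hlt : qc.2 + 2 * V (pvNewGoal qc.1 g) < a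
        · refine Or.inr ⟨qc, List.mem_cons_self .., hc, ?_⟩
          rw [hstep, h]
          unfold pvStep
          rw [if_pos hc, if_pos hlt]
        · refine Or.inl ?_
          rw [hstep, h]
          unfold pvStep
          rw [if_pos hc, if_neg hlt]
      · refine Or.inl ?_
        rw [hstep, h]
        unfold pvStep
        rw [Bool.not_eq_true] at hc
        rw [hc]
        simp
    · exact Or.inr ⟨pc, List.mem_cons_of_mem _ hmem, hcond, by rw [hstep, heq]⟩

theorem pvFold_le (V : List Int → Int) (g : List Int) (l1 l2 : List (List Int × Int)) (a : Int)
    (h : ∀ pc ∈ l2, ∃ qc ∈ l1, qc.1 = pc.1 ∧ qc.2 ≤ pc.2) :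
    l1.foldl (pvStep V g) a ≤ l2.foldl (pvStep V g) a := by
  rcases pvFold_cases V g l2 a with heq | ⟨pc, hmem, hcond, heq⟩
  · rw [heq]; exact pvFold_le_init V g l1 a
  · obtain ⟨qc, hq, hq1, hq2⟩ := h pc hmem
    have hle := pvFold_le_cand V g l1 a qc hq (by rw [hq1]; exact hcond)
    rw [hq1] at hle
    rw [heq]
    exact le_trans hle (Int.add_le_add_right hq2 _)

theorem pvFold_eq (V : List Int → Int) (g : List Int) (l1 l2 : List (List Int × Int)) (a : Int)
    (h12 : ∀ pc ∈ l1, ∃ qc ∈ l2, qc.1 = pc.1 ∧ qc.2 ≤ pc.2)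
    (h21 : ∀ pc ∈ l2, ∃ qc ∈ l1, qc.1 = pc.1 ∧ qc.2 ≤ pc.2) :
    l1.foldl (pvStep V g) a = l2.foldl (pvStep V g) a :=
  le_antisymm (pvFold_le V g l1 l2 a h21) (pvFold_le V g l2 l1 a h12)

-- the two pattern lists give the same recursion value
theorem pvCross (pats subs : List (List Int × Int)) (n : Nat)
    (hgp : pvGoodPats pats n) (hgs : pvGoodPats subs n)
    (h12 : ∀ pc ∈ pats, ∃ qc ∈ subs, qc.1 = pc.1 ∧ qc.2 ≤ pc.2)
    (h21 : ∀ pc ∈ subs, ∃ qc ∈ pats, qc.1 = pc.1 ∧ qc.2 ≤ pc.2) :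
    ∀ (g : List Int), g.length = n → pvLimit pats g = pvLimit subs g := by
  suffices H : ∀ (M : Nat) (g : List Int), g.length = n → pvMeasure g ≤ M →
      pvLimit pats g = pvLimit subs g by
    intro g hlen; exact H (pvMeasure g) g hlen (le_refl _)
  intro M
  induction M with
  | zero =>
    intro g hlen hm
    by_cases hz : pvAllZero g = true
    · show pvRecurseA pats (pvMeasure g + 1) g = pvRecurseA subs (pvMeasure g + 1) g
      rw [pvRecurseA, pvRecurseA]; simp [hz]
    · rw [Bool.not_eq_true] at hz
      rw [pvLimit_unfold pats n hgp g hlen hz, pvLimit_unfold subs n hgs g hlen hz]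
      have hcongr : subs.foldl (pvStep (pvLimit subs) g) 1000000
          = subs.foldl (pvStep (pvLimit pats) g) 1000000 := by
        apply PySem.List.foldl_congr_mem
        intro acc pc hpc
        unfold pvStep
        by_cases hcond : pvCondOK pc.1 g = true
        · obtain ⟨hplen, hpnn⟩ := hgs pc hpc
          have := pvMeasure_lt (by omega : pc.1.length = g.length) hpnn hcond hz
          omega
        · rw [Bool.not_eq_true] at hcond; rw [hcond]; simp
      rw [hcongr]
      exact pvFold_eq _ g pats subs 1000000 h12 h21
  | succ M ih =>
    intro g hlen hm
    by_cases hz : pvAllZero g = true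
    · show pvRecurseA pats (pvMeasure g + 1) g = pvRecurseA subs (pvMeasure g + 1) g
      rw [pvRecurseA, pvRecurseA]; simp [hz]
    · rw [Bool.not_eq_true] at hz
      rw [pvLimit_unfold pats n hgp g hlen hz, pvLimit_unfold subs n hgs g hlen hz]
      have hcongr : subs.foldl (pvStep (pvLimit subs) g) 1000000
          = subs.foldl (pvStep (pvLimit pats) g) 1000000 := by
        apply PySem.List.foldl_congr_mem
        intro acc pc hpc
        unfold pvStep
        by_cases hcond : pvCondOK pc.1 g = true
        · obtain ⟨hplen, hpnn⟩ := hgs pc hpc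
          have hlt := pvMeasure_lt (by omega : pc.1.length = g.length) hpnn hcond hz
          have hlen' : (pvNewGoal pc.1 g).length = n := by
            rw [pvStep_len (by omega : pc.1.length = g.length)]; exact hlen
          rw [ih (pvNewGoal pc.1 g) hlen' (by omega)]
        · rw [Bool.not_eq_true] at hcond; rw [hcond]; simp
      rw [hcongr]
      exact pvFold_eq _ g pats subs 1000000 h12 h21

theorem pvFoldB (pats : List (List Int × Int)) (n : Nat) (hg : pvGoodPats pats n)
    (f : Nat) (g : List Int) (hlen : g.length = n) (hgf : pvMeasure g ≤ f)
    (hz : pvAllZero g = false)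
    (IH : ∀ (g' : List Int) (memo : PySem.Dict (List Int) Int),
      g'.length = n → pvMeasure g' + 1 ≤ f → pvInv pats memo →
      (pvSolveB pats f g' memo).1 = pvLimit pats g' ∧ pvInv pats (pvSolveB pats f g' memo).2) :
    ∀ (l : List (List Int × Int)), (∀ pc ∈ l, pc ∈ pats) →
    ∀ (la : Int) (memo : PySem.Dict (List Int) Int), pvInv pats memo →
      (l.foldl (fun (acc : Int × PySem.Dict (List Int) Int) pc =>
          if pvCondOK pc.1 g then
            let rm := pvSolveB pats f (pvNewGoal pc.1 g) acc.2
            let candidate := pc.2 + 2 * rm.1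
            (if candidate < acc.1 then candidate else acc.1, rm.2)
          else acc) (la, memo)).1 = l.foldl (pvStep (pvLimit pats) g) la ∧
      pvInv pats (l.foldl (fun (acc : Int × PySem.Dict (List Int) Int) pc =>
          if pvCondOK pc.1 g then
            let rm := pvSolveB pats f (pvNewGoal pc.1 g) acc.2
            let candidate := pc.2 + 2 * rm.1
            (if candidate < acc.1 then candidate else acc.1, rm.2)
          else acc) (la, memo)).2 := by
  intro l
  induction l with
  | nil => intro _ la memo hinv; exact ⟨rfl, hinv⟩
  | cons pc l ihl =>
    intro hsub la memo hinv
    have hpc : pc ∈ pats := hsub pc (List.mem_cons_self ..)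
    by_cases hcond : pvCondOK pc.1 g = true
    · obtain ⟨hplen, hpnn⟩ := hg pc hpc
      have hlt := pvMeasure_lt (by omega : pc.1.length = g.length) hpnn hcond hz
      have hlen' : (pvNewGoal pc.1 g).length = n := by
        rw [pvStep_len (by omega : pc.1.length = g.length)]; exact hlen
      obtain ⟨hv, hinv'⟩ := IH (pvNewGoal pc.1 g) memo hlen' (by omega) hinv
      simp only [List.foldl_cons, hcond, if_true, hv, pvStep]
      exact ihl (fun q hq => hsub q (List.mem_cons_of_mem _ hq)) _ _ hinv'
    · simp only [List.foldl_cons, hcond, Bool.false_eq_true, if_false, pvStep]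
      exact ihl (fun q hq => hsub q (List.mem_cons_of_mem _ hq)) _ _ hinv

theorem pvMemo (pats : List (List Int × Int)) (n : Nat) (hg : pvGoodPats pats n) :
    ∀ (fuel : Nat) (g : List Int) (memo : PySem.Dict (List Int) Int),
      g.length = n → pvMeasure g + 1 ≤ fuel → pvInv pats memo →
      (pvSolveB pats fuel g memo).1 = pvLimit pats g ∧
        pvInv pats (pvSolveB pats fuel g memo).2 := by
  intro fuel
  induction fuel using Nat.strong_induction_on with
  | _ fuel ih =>
    intro g memo hlen hfuel hinv
    cases fuel with
    | zero => omega
    | succ f =>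
      rw [pvSolveB]
      cases hget : memo.get? g with
      | some v =>
        exact ⟨hinv (g, v) (PySem.Dict.mem_items_of_get?_eq_some _ hget), hinv⟩
      | none =>
        by_cases hz : pvAllZero g = true
        · simp only [hz, if_true]
          have h0 : pvLimit pats g = 0 := by rw [pvLimit, pvRecurseA]; simp [hz]
          refine ⟨h0.symm, ?_⟩
          intro kv hkv
          rcases (PySem.Dict.mem_items_insert _ _ _ _).mp hkv with rfl | ⟨h, _⟩
          · exact h0.symm
          · exact hinv kv h
        · rw [Bool.not_eq_true] at hz
          simp only [hz, Bool.false_eq_true, if_false]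
          obtain ⟨hfold, hinv'⟩ := pvFoldB pats n hg f g hlen (by omega) hz
            (fun g' memo' hl hb hi => ih f (by omega) g' memo' hl hb hi)
            pats (fun pc hpc => hpc) 1000000 memo hinv
          rw [pvLimit_unfold pats n hg g hlen hz]
          refine ⟨hfold, ?_⟩
          intro kv hkv
          rcases (PySem.Dict.mem_items_insert _ _ _ _).mp hkv with rfl | ⟨h, _⟩
          · rw [hfold, pvLimit_unfold pats n hg g hlen hz]
          · exact hinv' kv h

-- ===== VERDICT (by name: the statement is the Claim_ definition above) =====
theorem calculate_required_presses_spec : Claim_equal_calculate_required_presses := by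
  intro buttons joltages _
  show calculate_required_presses buttons joltages = calculate_required_presses_alt buttons joltages
  rw [calculate_required_presses, calculate_required_presses_alt]
  by_cases hz : pvAllZero joltages = true
  · simp [hz]
  · rw [Bool.not_eq_true] at hz
    simp only [hz, Bool.false_eq_true, if_false]
    set pats := (patterns_from_buttons buttons joltages.length).items 
    set subs := pvSubsets joltages.length buttons 
    have hgp : pvGoodPats pats joltages.length := by
      intro pc hpc
      obtain ⟨bs, _, h1, _⟩ := pvA_sound buttons joltages.length pc hpc
      rw [h1]; exact pvSumOf_good _ bs
    have hgs : pvGoodPats subs joltages.length := by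
      intro pc hpc
      obtain ⟨bs, _, h1, _⟩ := (pvB_mem buttons joltages.length pc).mp hpc
      rw [h1]; exact pvSumOf_good _ bs
    have h12 : ∀ pc ∈ pats, ∃ qc ∈ subs, qc.1 = pc.1 ∧ qc.2 ≤ pc.2 := by
      intro pc hpc
      obtain ⟨bs, hsl, h1, h2⟩ := pvA_sound buttons joltages.length pc hpc
      exact ⟨pc, (pvB_mem buttons joltages.length pc).mpr ⟨bs, hsl, h1, h2⟩, rfl, le_refl _⟩
    have h21 : ∀ pc ∈ subs, ∃ qc ∈ pats, qc.1 = pc.1 ∧ qc.2 ≤ pc.2 := by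
      intro pc hpc
      obtain ⟨bs, hsl, h1, h2⟩ := (pvB_mem buttons joltages.length pc).mp hpc
      obtain ⟨c, hc, hcle⟩ := pvA_complete buttons joltages.length bs hsl
      refine ⟨(pvSumOf joltages.length bs, c),
        PySem.Dict.mem_items_of_get?_eq_some _ hc, by rw [h1], by rw [h2]; exact hcle⟩
    have hbound : pvMeasure joltages + 1 ≤ (joltages.map Int.natAbs).sum + 1 := by
      have h : pvMeasure joltages ≤ (joltages.map Int.natAbs).sum := by
        apply List.sum_le_sum
        intro i _; omega
      omega
    have hempty : pvInv subs PySem.Dict.empty := by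
      intro kv hkv
      have he : (PySem.Dict.empty : PySem.Dict (List Int) Int).items = [] := rfl
      rw [he] at hkv; simp at hkv
    rw [pvStable pats joltages.length hgp _ joltages rfl hbound,
        (pvMemo subs joltages.length hgs _ joltages PySem.Dict.empty rfl hbound hempty).1,
        pvCross pats subs joltages.length hgp hgs h12 h21 joltages rfl]
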